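-- pv_equiv track=rewrite | github.com/pranavdes/Test | Roster.py | parse_days_string
-- ===== SOURCE A (Python) =====
-- def parse_days_string(days_str):
--     """
--     Given a string of days (e.g., "Mon, Wed, Fri" or "Monday, Tuesday"),
--     returns a set of lowercase day abbreviations and full names.
--     For example, "Mon, Wed" becomes {"mon", "monday", "wed", "wednesday"}.
--     This is used to check if a seat is available on a certain day.
--     """
--     if not isinstance(days_str, str):
--         return set()                   # If input is not a string, return an empty set.
--     parts = [p.strip() for p in days_str.split(',')]  # Split the string by commas.
--     day_set = set()
--     for p in parts:
--         p_l = p.lower()              # Convert to lowercase.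
--         if p_l.startswith("mon"):
--             day_set.update(["mon", "monday"])
--         elif p_l.startswith("tue"):
--             day_set.update(["tue", "tuesday"])
--         elif p_l.startswith("wed"):
--             day_set.update(["wed", "wednesday"])
--         elif p_l.startswith("thu"):
--             day_set.update(["thu", "thursday"])
--         elif p_l.startswith("fri"):
--             day_set.update(["fri", "friday"])
--     return day_set
-- ===== SOURCE B (Python) =====
-- _DAYS = [("mon", "monday"), ("tue", "tuesday"), ("wed", "wednesday"),
--          ("thu", "thursday"), ("fri", "friday")]
--
--
-- def parse_days_string(days_str):
--     if not isinstance(days_str, str):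
--         return set()
--
--     def go(parts, remaining):
--         # recursion over the parts, carrying the list of not-yet-matched days;
--         # a matched day is removed from the candidates, so duplicates emit nothing
--         if not parts:
--             return []
--         key = parts[0].strip().lower()[:3]
--         hit = [pair for pair in remaining if pair[0] == key]
--         if hit:
--             abbr, full = hit[0]
--             return [abbr, full] + go(parts[1:], [pr for pr in remaining if pr[0] != key])
--         return go(parts[1:], remaining)
--
--     return set(go(days_str.split(','), _DAYS))
-- ===== Notes on version B (the rewrite author's own statement) =====
-- stated objective: alternative
-- what changed: Instead of A's iterative set-accumulator with a five-branch startswith cascade and membership-based dedup, B is a recursion over the parts that carries a shrinking candidate list of not-yet-matched days, emits matched (abbr, full) pairs into a flat list, and builds the set once at the end.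
import Mathlib
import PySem

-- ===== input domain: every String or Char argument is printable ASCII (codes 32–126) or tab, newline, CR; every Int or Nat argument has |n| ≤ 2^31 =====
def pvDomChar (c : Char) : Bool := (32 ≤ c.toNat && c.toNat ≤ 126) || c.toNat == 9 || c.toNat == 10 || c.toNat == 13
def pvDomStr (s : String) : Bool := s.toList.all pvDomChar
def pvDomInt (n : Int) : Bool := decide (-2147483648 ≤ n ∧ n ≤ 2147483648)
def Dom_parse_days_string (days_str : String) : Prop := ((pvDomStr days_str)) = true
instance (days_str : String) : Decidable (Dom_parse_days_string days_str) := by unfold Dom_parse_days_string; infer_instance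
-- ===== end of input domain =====

-- B replaces A's iterative set-accumulator with startswith cascade by a recursion over the
-- parts carrying a shrinking candidate list of not-yet-matched days (alternative; same result).

-- ===== PORT A =====
-- one iteration of A's for-loop: lower the part, then the startswith if/elif chain
def pvDayStep (day_set : PySem.Set String) (p : String) : PySem.Set String :=
  let p_l := PySem.Str.lower p
  if PySem.Str.startswith p_l "mon" then PySem.Set.update day_set ["mon", "monday"]
  else if PySem.Str.startswith p_l "tue" then PySem.Set.update day_set ["tue", "tuesday"]
  else if PySem.Str.startswith p_l "wed" then PySem.Set.update day_set ["wed", "wednesday"]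
  else if PySem.Str.startswith p_l "thu" then PySem.Set.update day_set ["thu", "thursday"]
  else if PySem.Str.startswith p_l "fri" then PySem.Set.update day_set ["fri", "friday"]
  else day_set

def parse_days_string (days_str : String) : List String :=
  -- days_str.split(','): the separator is the nonempty literal ",", so split? is always `some` (getD is exact)
  let parts := ((PySem.Str.split? days_str ",").getD []).map PySem.Str.strip
  parts.foldl pvDayStep PySem.Set.empty

-- ===== PORT B =====
def pvDays : List (String × String) :=
  [("mon", "monday"), ("tue", "tuesday"), ("wed", "wednesday"), ("thu", "thursday"), ("fri", "friday")]

-- B's recursion: parts on the left, the not-yet-matched candidate days on the right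
def pvGo : List String → List (String × String) → List String
  | [], _ => []
  | p :: rest, remaining =>
    let key := PySem.Str.slice (PySem.Str.lower (PySem.Str.strip p)) none (some 3)
    match remaining.filter (fun pr => pr.1 == key) with
    | [] => pvGo rest remaining
    | pr :: _ => pr.1 :: pr.2 :: pvGo rest (remaining.filter (fun pr => !(pr.1 == key)))

def parse_days_string_alt (days_str : String) : List String :=
  PySem.Set.ofList (pvGo ((PySem.Str.split? days_str ",").getD []) pvDays)

-- ===== PRECONDITION & SPEC =====
def Spec_parse_days_string (days_str : String) (out : List String) : Prop := out = parse_days_string_alt days_str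
instance (days_str : String) (out : List String) : Decidable (Spec_parse_days_string days_str out) := by unfold Spec_parse_days_string; infer_instance

-- ===== CLAIM (what is proved, stated in full; the proofs are below) =====
def Claim_equal_parse_days_string : Prop := ∀ (days_str : String), Dom_parse_days_string days_str → Spec_parse_days_string days_str (parse_days_string days_str)

-- ===== LEMMAS AND PROOFS =====

-- startswith against a 3-character literal is a take-3 test
lemma startswith3 (q k : String) (c1 c2 c3 : Char) (hk : k.toList = [c1, c2, c3]) :
    PySem.Str.startswith q k = decide (q.toList.take 3 = [c1, c2, c3]) := by
  have hb : PySem.Str.startswith q k = PySem.Chars.startswith q.toList [c1,c2,c3] := by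
    simp [PySem.Str.startswith_eq, hk]
  rw [hb]
  by_cases ht : q.toList.take 3 = [c1,c2,c3]
  · have : PySem.Chars.startswith q.toList [c1,c2,c3] = true :=
      (PySem.Chars.startswith_iff _ _).mpr (List.prefix_iff_eq_take.mpr (by simpa using ht.symm))
    rw [this]; simp [ht]
  · have hn : ¬ ([c1,c2,c3] <+: q.toList) := fun hp => ht (by simpa using (List.prefix_iff_eq_take.mp hp).symm)
    have : PySem.Chars.startswith q.toList [c1,c2,c3] = false := by
      rw [← Bool.not_eq_true, PySem.Chars.startswith_iff]; exact hn
    rw [this]; simp [ht]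

-- q[:3] as a list
lemma slice3_toList (q : String) : (PySem.Str.slice q none (some 3)).toList = q.toList.take 3 := by
  simp [PySem.Str.toList_slice, PySem.List.slice_to]

lemma slice_eq_lit (q k : String) (c1 c2 c3 : Char) (hk : k.toList = [c1, c2, c3])
    (h : q.toList.take 3 = [c1, c2, c3]) : PySem.Str.slice q none (some 3) = k := by
  rw [← String.toList_inj, slice3_toList, hk, h]

lemma slice_ne_lit (q k : String) (c1 c2 c3 : Char) (hk : k.toList = [c1, c2, c3])
    (h : ¬ q.toList.take 3 = [c1, c2, c3]) : (k == PySem.Str.slice q none (some 3)) = false := by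
  rw [beq_eq_false_iff_ne]
  intro he
  exact h (by rw [← slice3_toList, ← he, hk])

-- A's loop body as a first-match lookup in pvDays by the part's 3-letter key
def pvKeyStep (s : PySem.Set String) (k : String) : PySem.Set String :=
  match pvDays.find? (fun pr => pr.1 == k) with
  | some pr => PySem.Set.update s [pr.1, pr.2]
  | none => s

lemma step_eq (s : PySem.Set String) (p : String) :
    pvDayStep s p = pvKeyStep s (PySem.Str.slice (PySem.Str.lower p) none (some 3)) := by
  unfold pvDayStep
  dsimp only
  set q := PySem.Str.lower p with hq
  rw [startswith3 q "mon" 'm' 'o' 'n' (by decide), startswith3 q "tue" 't' 'u' 'e' (by decide),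
      startswith3 q "wed" 'w' 'e' 'd' (by decide), startswith3 q "thu" 't' 'h' 'u' (by decide),
      startswith3 q "fri" 'f' 'r' 'i' (by decide)]
  by_cases h1 : q.toList.take 3 = ['m','o','n']
  · rw [slice_eq_lit q "mon" 'm' 'o' 'n' (by decide) h1]; simp [h1, pvKeyStep, pvDays]
  · by_cases h2 : q.toList.take 3 = ['t','u','e']
    · rw [slice_eq_lit q "tue" 't' 'u' 'e' (by decide) h2]; simp [h2, pvKeyStep, pvDays, List.find?]
    · by_cases h3 : q.toList.take 3 = ['w','e','d']
      · rw [slice_eq_lit q "wed" 'w' 'e' 'd' (by decide) h3]; simp [h3, pvKeyStep, pvDays, List.find?]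
      · by_cases h4 : q.toList.take 3 = ['t','h','u']
        · rw [slice_eq_lit q "thu" 't' 'h' 'u' (by decide) h4]; simp [h4, pvKeyStep, pvDays, List.find?]
        · by_cases h5 : q.toList.take 3 = ['f','r','i']
          · rw [slice_eq_lit q "fri" 'f' 'r' 'i' (by decide) h5]; simp [h5, pvKeyStep, pvDays, List.find?]
          · simp only [h1, h2, h3, h4, h5, decide_false, Bool.false_eq_true, if_false]
            have : pvDays.find? (fun pr => pr.1 == PySem.Str.slice q none (some 3)) = none := by
              simp [pvDays, List.find?,
                slice_ne_lit q "mon" 'm' 'o' 'n' (by decide) h1,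
                slice_ne_lit q "tue" 't' 'u' 'e' (by decide) h2,
                slice_ne_lit q "wed" 'w' 'e' 'd' (by decide) h3,
                slice_ne_lit q "thu" 't' 'h' 'u' (by decide) h4,
                slice_ne_lit q "fri" 'f' 'r' 'i' (by decide) h5]
            rw [pvKeyStep, this]

-- update with an already-contained list of names is a no-op
lemma update_of_subset {α : Type} [BEq α] [LawfulBEq α] (s : PySem.Set α) (xs : List α)
    (h : ∀ x ∈ xs, x ∈ s) : PySem.Set.update s xs = s := by
  induction xs generalizing s with
  | nil => rfl
  | cons x xs ih =>
    show (xs.foldl PySem.Set.add (PySem.Set.add s x)) = s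
    rw [PySem.Set.add_of_mem (h x (by simp))]
    exact ih s (fun y hy => h y (by simp [hy]))

-- update with two fresh, distinct names is an append
lemma update_fresh2 (s : PySem.Set String) (a b : String)
    (ha : a ∉ s) (hb : b ∉ s) (hab : a ≠ b) :
    PySem.Set.update s [a, b] = s ++ [a, b] := by
  show PySem.Set.add (PySem.Set.add s a) b = s ++ [a, b]
  rw [PySem.Set.add_of_not_mem ha, PySem.Set.add_of_not_mem (by simp [hb, Ne.symm hab])]
  simp

-- concrete facts about pvDays, all decidable
lemma pvDays_names_ne : ∀ pr ∈ pvDays, pr.1 ≠ pr.2 := by decide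
lemma pvDays_keys_nodup : (pvDays.map Prod.fst).Nodup := by decide
lemma pvDays_disjoint : ∀ pr ∈ pvDays, ∀ pr' ∈ pvDays, pr.1 ≠ pr'.1 →
    pr.1 ≠ pr'.1 ∧ pr.1 ≠ pr'.2 ∧ pr.2 ≠ pr'.1 ∧ pr.2 ≠ pr'.2 := by decide

-- with nodup keys, find? of a present key returns exactly that pair
lemma find?_of_mem_keyNodup (l : List (String × String)) (hn : (l.map Prod.fst).Nodup)
    (pr : String × String) (hm : pr ∈ l) (k : String) (hk : pr.1 = k) :
    l.find? (fun x => x.1 == k) = some pr := by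
  induction l with
  | nil => cases hm
  | cons y l ih =>
    rcases List.mem_cons.mp hm with h | h
    · subst h; simp [List.find?, hk]
    · have hy : (y.1 == k) = false := by
        rw [beq_eq_false_iff_ne]
        intro he
        have hmem : pr.1 ∈ l.map Prod.fst := List.mem_map.mpr ⟨pr, h, rfl⟩
        rw [hk, ← he] at hmem
        exact (List.nodup_cons.mp hn).1 hmem
      simp only [List.find?, hy]
      exact ih (List.nodup_cons.mp hn).2 h

set_option maxHeartbeats 1000000 in
-- the main invariant: A's fold over the stripped parts equals s ++ B's recursion,
-- provided remaining is a sublist of pvDays and s contains exactly the names of the used days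
lemma go_spec (parts : List String) : ∀ (s : PySem.Set String) (remaining : List (String × String)),
    remaining.Sublist pvDays →
    (∀ pr ∈ pvDays, (pr ∈ remaining → pr.1 ∉ s ∧ pr.2 ∉ s) ∧ (pr ∉ remaining → pr.1 ∈ s ∧ pr.2 ∈ s)) →
    (parts.map PySem.Str.strip).foldl pvDayStep s = s ++ pvGo parts remaining := by
  induction parts with
  | nil => intro s remaining _ _; simp [pvGo]
  | cons p rest ih =>
    intro s remaining hsub hinv
    have hkeys : (remaining.map Prod.fst).Nodup := (pvDays_keys_nodup.sublist (hsub.map Prod.fst))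
    simp only [List.map_cons, List.foldl_cons, pvGo]
    rw [step_eq]
    generalize PySem.Str.slice (PySem.Str.lower (PySem.Str.strip p)) none (some 3) = k
    rcases hfil : remaining.filter (fun pr => pr.1 == k) with _ | ⟨pr, tl⟩
    · -- no candidate matches the key
      rw [hfil]
      show (rest.map PySem.Str.strip).foldl pvDayStep (pvKeyStep s k) = s ++ pvGo rest remaining
      have hnomatch : ∀ pr ∈ remaining, pr.1 ≠ k := by
        intro pr hm he
        have : pr ∈ remaining.filter (fun x => x.1 == k) := List.mem_filter.mpr ⟨hm, by simp [he]⟩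
        rw [hfil] at this; cases this
      have hstep : pvKeyStep s k = s := by
        unfold pvKeyStep
        rcases hfind : pvDays.find? (fun x => x.1 == k) with _ | P
        · rw [hfind]
        · rw [hfind]
          have hPk : P.1 = k := by simpa using List.find?_some hfind
          have hPd : P ∈ pvDays := List.mem_of_find?_eq_some hfind
          have hPnr : P ∉ remaining := fun hm => hnomatch P hm hPk
          have := ((hinv P hPd).2 hPnr)
          exact update_of_subset s [P.1, P.2] (by
            intro x hx
            rcases List.mem_cons.mp hx with h | hx'
            · exact h ▸ this.1
            rcases List.mem_cons.mp hx' with h | h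
            · exact h ▸ this.2
            cases h)
      rw [hstep]
      exact ih s remaining hsub hinv
    · -- pr is the (unique) candidate with this key
      rw [hfil]
      show (rest.map PySem.Str.strip).foldl pvDayStep (pvKeyStep s k) =
        s ++ (pr.1 :: pr.2 :: pvGo rest (remaining.filter (fun x => !(x.1 == k))))
      have hprf : pr ∈ remaining.filter (fun x => x.1 == k) := by rw [hfil]; simp
      have hprm : pr ∈ remaining := (List.mem_filter.mp hprf).1
      have hprk : pr.1 = k := by simpa using (List.mem_filter.mp hprf).2
      have hprd : pr ∈ pvDays := hsub.subset hprm
      have hfind : pvDays.find? (fun x => x.1 == k) = some pr :=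
        find?_of_mem_keyNodup pvDays pvDays_keys_nodup pr hprd k hprk
      have hfresh := (hinv pr hprd).1 hprm
      have hstep : pvKeyStep s k = s ++ [pr.1, pr.2] := by
        unfold pvKeyStep
        rw [hfind]
        exact update_fresh2 s pr.1 pr.2 hfresh.1 hfresh.2 (pvDays_names_ne pr hprd)
      rw [hstep]
      have hsub' : (remaining.filter (fun x => !(x.1 == k))).Sublist pvDays :=
        List.Sublist.trans List.filter_sublist hsub
      have hinv' : ∀ pr' ∈ pvDays,
          (pr' ∈ remaining.filter (fun x => !(x.1 == k)) → pr'.1 ∉ s ++ [pr.1, pr.2] ∧ pr'.2 ∉ s ++ [pr.1, pr.2]) ∧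
          (pr' ∉ remaining.filter (fun x => !(x.1 == k)) → pr'.1 ∈ s ++ [pr.1, pr.2] ∧ pr'.2 ∈ s ++ [pr.1, pr.2]) := by
        intro pr' hpr'd
        constructor
        · intro hm'
          have hm : pr' ∈ remaining := (List.mem_filter.mp hm').1
          have hne : pr'.1 ≠ k := by simpa using (List.mem_filter.mp hm').2
          have hold := (hinv pr' hpr'd).1 hm
          have hdis := pvDays_disjoint pr' hpr'd pr hprd (by rw [hprk]; exact hne)
          constructor
          · simp only [List.mem_append]
            rintro (h | h)
            · exact hold.1 h
            rcases List.mem_cons.mp h with h | h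
            · exact hdis.1 h
            rcases List.mem_cons.mp h with h | h
            · exact hdis.2.1 h
            simp at h
          · simp only [List.mem_append]
            rintro (h | h)
            · exact hold.2 h
            rcases List.mem_cons.mp h with h | h
            · exact hdis.2.2.1 h
            rcases List.mem_cons.mp h with h | h
            · exact hdis.2.2.2 h
            simp at h
        · intro hm'
          by_cases hm : pr' ∈ remaining
          · -- then pr'.1 = k, so pr' = pr by key uniqueness
            have hk' : pr'.1 = k := by
              by_contra hne
              exact hm' (List.mem_filter.mpr ⟨hm, by simp [hne]⟩)
            have : pr' = pr := by
              have h1 : remaining.find? (fun x => x.1 == k) = some pr' :=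
                find?_of_mem_keyNodup remaining hkeys pr' hm k hk'
              have h2 : remaining.find? (fun x => x.1 == k) = some pr :=
                find?_of_mem_keyNodup remaining hkeys pr hprm k hprk
              rw [h1] at h2; exact Option.some_inj.mp h2
            subst this
            constructor <;> simp
          · have := (hinv pr' hpr'd).2 hm
            constructor <;> simp [this.1, this.2]
      have := ih (s ++ [pr.1, pr.2]) (remaining.filter (fun x => !(x.1 == k))) hsub' hinv'
      rw [this]
      simp

-- Set.add and Set.update preserve Nodup; hence A's fold result is Nodup
lemma add_nodup {α : Type} [BEq α] [LawfulBEq α] (s : PySem.Set α) (x : α) (h : s.Nodup) :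
    (PySem.Set.add s x).Nodup := by
  by_cases hm : x ∈ s
  · rw [PySem.Set.add_of_mem hm]; exact h
  · rw [PySem.Set.add_of_not_mem hm]
    simpa [List.nodup_append] using ⟨h, fun a ha he => hm (he ▸ ha)⟩

lemma update_nodup {α : Type} [BEq α] [LawfulBEq α] (xs : List α) :
    ∀ (s : PySem.Set α), s.Nodup → (PySem.Set.update s xs).Nodup := by
  induction xs with
  | nil => intro s h; exact h
  | cons x xs ih =>
    intro s h
    exact ih (PySem.Set.add s x) (add_nodup s x h)

lemma dayStep_nodup (s : PySem.Set String) (p : String) (h : s.Nodup) : (pvDayStep s p).Nodup := by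
  unfold pvDayStep
  dsimp only
  split_ifs <;> first | exact update_nodup _ s h | exact h

lemma foldl_dayStep_nodup (l : List String) : ∀ (s : PySem.Set String), s.Nodup →
    (l.foldl pvDayStep s).Nodup := by
  induction l with
  | nil => intro s h; exact h
  | cons p l ih => intro s h; exact ih (pvDayStep s p) (dayStep_nodup s p h)

-- set(l) of a duplicate-free list is l itself
lemma foldl_add_fresh {α : Type} [BEq α] [LawfulBEq α] (l : List α) :
    ∀ (s : PySem.Set α), l.Nodup → (∀ x ∈ l, x ∉ s) → l.foldl PySem.Set.add s = s ++ l := by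
  induction l with
  | nil => intro s _ _; simp
  | cons a l ih =>
    intro s hn hf
    rw [List.foldl_cons, PySem.Set.add_of_not_mem (hf a (by simp))]
    rw [ih (s ++ [a]) (List.nodup_cons.mp hn).2]
    · simp
    · intro x hx
      simp only [List.mem_append, List.mem_singleton]
      rintro (h | h)
      · exact hf x (by simp [hx]) h
      · exact (List.nodup_cons.mp hn).1 (h ▸ hx)

lemma ofList_of_nodup {α : Type} [BEq α] [LawfulBEq α] (l : List α) (h : l.Nodup) :
    PySem.Set.ofList l = l := by
  rw [PySem.Set.ofList_eq_foldl]
  simpa using foldl_add_fresh l PySem.Set.empty h (by intro x _ hx; simp [PySem.Set.empty] at hx)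

-- ===== VERDICT (by name: the statement is the Claim_ definition above) =====
theorem parse_days_string_spec : Claim_equal_parse_days_string := by
  intro days_str _
  unfold Spec_parse_days_string parse_days_string parse_days_string_alt
  dsimp only
  set parts := (PySem.Str.split? days_str ",").getD [] with hparts
  have hmain : (parts.map PySem.Str.strip).foldl pvDayStep PySem.Set.empty = pvGo parts pvDays := by
    have := go_spec parts PySem.Set.empty pvDays (List.Sublist.refl _)
      (by
        intro pr hpr
        constructor
        · intro _; constructor <;> simp [PySem.Set.empty]
        · intro h; exact absurd hpr h)
    simpa [PySem.Set.empty] using this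
  rw [hmain, ofList_of_nodup]
  rw [← hmain]
  exact foldl_dayStep_nodup _ PySem.Set.empty (by simp [PySem.Set.empty])
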